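-- pv_equiv track=rewrite | github.com/paiml/depyler | examples/hard_edit_distance.py | insertion_deletion_distance
-- ===== SOURCE A (Python) =====
-- def insertion_deletion_distance(s1: str, s2: str) -> int:
--     """Minimum insertions + deletions to transform s1 to s2 (no replacement)."""
--     m: int = len(s1)
--     n: int = len(s2)
--     prev: list[int] = []
--     j: int = 0
--     while j <= n:
--         prev.append(j)
--         j = j + 1
--     i: int = 1
--     while i <= m:
--         curr: list[int] = [i]
--         j = 1
--         while j <= n:
--             if s1[i - 1] == s2[j - 1]:
--                 curr.append(prev[j - 1])
--             else:
--                 ins: int = curr[j - 1] + 1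
--                 delt: int = prev[j] + 1
--                 best: int = ins
--                 if delt < best:
--                     best = delt
--                 curr.append(best)
--             j = j + 1
--         prev = curr
--         i = i + 1
--     return prev[n]
-- ===== SOURCE B (Python) =====
-- def insertion_deletion_distance(s1: str, s2: str) -> int:
--     """Minimum insertions + deletions via LCS: m + n - 2*lcs(s1, s2)."""
--     n = len(s2)
--     prev = [0] * (n + 1)
--     for c in s1:
--         curr = [0]
--         for j in range(1, n + 1):
--             if c == s2[j - 1]:
--                 curr.append(prev[j - 1] + 1)
--             else:
--                 curr.append(max(curr[j - 1], prev[j]))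
--         prev = curr
--     return len(s1) + n - 2 * prev[n]
-- ===== Notes on version B (the rewrite author's own statement) =====
-- stated objective: alternative
-- what changed: B computes the longest-common-subsequence length with the max-based one-row DP and returns m + n - 2*lcs, instead of A's min-based insert/delete cost recurrence.
import Mathlib
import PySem

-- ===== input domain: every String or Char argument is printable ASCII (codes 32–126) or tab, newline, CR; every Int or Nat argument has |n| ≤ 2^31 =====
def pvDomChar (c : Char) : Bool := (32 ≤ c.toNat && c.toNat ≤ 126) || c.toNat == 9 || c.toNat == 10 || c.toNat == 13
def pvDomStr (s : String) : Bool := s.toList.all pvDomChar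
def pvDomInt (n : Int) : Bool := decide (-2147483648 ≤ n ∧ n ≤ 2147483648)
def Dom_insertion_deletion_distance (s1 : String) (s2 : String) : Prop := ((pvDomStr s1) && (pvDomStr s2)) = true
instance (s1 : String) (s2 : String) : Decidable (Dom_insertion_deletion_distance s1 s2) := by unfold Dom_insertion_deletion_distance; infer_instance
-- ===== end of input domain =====

-- B replaces A's min-based insert/delete cost DP by the max-based LCS row DP plus the
-- identity dist = m + n - 2*lcs: an alternative algorithm of the same O(mn) cost.


-- ===== PORT A =====
-- first while loop: prev = [0, 1, ..., n] built by appending j while j ≤ n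
def pvBuildInit (j n : Int) : List Int :=
  if j ≤ n then j :: pvBuildInit (j + 1) n else []
termination_by (n + 1 - j).toNat
decreasing_by omega

-- inner while loop of A: walks s2 and prev together (prev[j-1] = diag, prev[j] = up),
-- `left` is curr[j-1]; branch order and the min-via-if are as in A
def pvRowA (c : Char) : List Char → List Int → Int → List Int
  | d :: s2, diag :: up :: rest, left =>
      let v := if c == d then diag
               else
                 let ins := left + 1
                 let delt := up + 1
                 if delt < ins then delt else ins
      v :: pvRowA c s2 (up :: rest) v
  | _, _, _ => []

-- outer while loop of A: one row per character of s1, curr starts as [i]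
def pvLoopA (s2 : List Char) : List Char → Int → List Int → List Int
  | [], _, prev => prev
  | c :: rest, i, prev => pvLoopA s2 rest (i + 1) ((i + 1) :: pvRowA c s2 prev (i + 1))

def insertion_deletion_distance (s1 : String) (s2 : String) : Int :=
  let n : Int := (s2.toList.length : Int)
  let prev := pvBuildInit 0 n
  let final := pvLoopA s2.toList s1.toList 0 prev
  PySem.List.pyGetD final n 0   -- prev[n]; index always in range

-- ===== PORT B =====
-- inner for loop of Source B: LCS row, `left` is curr[j-1]
def pvRowB (c : Char) : List Char → List Int → Int → List Int
  | d :: s2, diag :: up :: rest, left =>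
      let v := if c == d then diag + 1 else max left up
      v :: pvRowB c s2 (up :: rest) v
  | _, _, _ => []

def pvLoopB (s2 : List Char) : List Char → List Int → List Int
  | [], prev => prev
  | c :: rest, prev => pvLoopB s2 rest (0 :: pvRowB c s2 prev 0)

def insertion_deletion_distance_alt (s1 : String) (s2 : String) : Int :=
  let n := s2.toList.length
  let prev := List.replicate (n + 1) (0 : Int)
  let final := pvLoopB s2.toList s1.toList prev
  (s1.toList.length : Int) + (n : Int) - 2 * PySem.List.pyGetD final (n : Int) 0

-- ===== PRECONDITION & SPEC =====
def Spec_insertion_deletion_distance (s1 : String) (s2 : String) (out : Int) : Prop := out = insertion_deletion_distance_alt s1 s2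
instance (s1 : String) (s2 : String) (out : Int) : Decidable (Spec_insertion_deletion_distance s1 s2 out) := by unfold Spec_insertion_deletion_distance; infer_instance

-- ===== CLAIM (what is proved, stated in full; the proofs are below) =====
def Claim_equal_insertion_deletion_distance : Prop := ∀ (s1 : String) (s2 : String), Dom_insertion_deletion_distance s1 s2 → Spec_insertion_deletion_distance s1 s2 (insertion_deletion_distance s1 s2)

-- ===== LEMMAS AND PROOFS =====
-- Rel i j pa pb: pa and pb have the same shape and pa[k] = i + (j+k) - 2 * pb[k]
def pvRel (i : Int) : Int → List Int → List Int → Prop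
  | _, [], [] => True
  | j, a :: as, b :: bs => (a = i + j - 2 * b) ∧ pvRel i (j + 1) as bs
  | _, _, _ => False

theorem pvRel_length {i j : Int} : ∀ {pa pb : List Int}, pvRel i j pa pb → pa.length = pb.length := by
  intro pa
  induction pa generalizing j with
  | nil => intro pb h; cases pb with
    | nil => rfl
    | cons b bs => simp [pvRel] at h
  | cons a as ih => intro pb h; cases pb with
    | nil => simp [pvRel] at h
    | cons b bs => simpa using ih h.2

theorem pvRel_getD {i : Int} : ∀ (pa pb : List Int) (j : Int) (k : Nat),
    pvRel i j pa pb → k < pa.length →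
    pa.getD k 0 = i + j + k - 2 * pb.getD k 0 := by
  intro pa
  induction pa with
  | nil => intro pb j k _ hk; simp at hk
  | cons a as ih =>
    intro pb j k h hk
    cases pb with
    | nil => simp [pvRel] at h
    | cons b bs =>
      cases k with
      | zero => simpa using h.1
      | succ k' =>
        have := ih bs (j + 1) k' h.2 (by simpa using hk)
        simp only [List.getD_cons_succ] at *
        push_cast
        omega

theorem pvBuildInit_cons {j n : Int} (h : j ≤ n) : pvBuildInit j n = j :: pvBuildInit (j + 1) n := by
  rw [pvBuildInit]; simp [h]

theorem pvBuildInit_nil {j n : Int} (h : ¬ j ≤ n) : pvBuildInit j n = [] := by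
  rw [pvBuildInit]; simp [h]

theorem pvRel_init : ∀ (k : Nat) (j : Int), pvRel 0 j (pvBuildInit j (j + k)) (List.replicate (k + 1) 0) := by
  intro k
  induction k with
  | zero =>
    intro j
    rw [pvBuildInit_cons (by omega), pvBuildInit_nil (by push_cast; omega)]
    exact ⟨by push_cast; ring, trivial⟩
  | succ k' ih =>
    intro j
    rw [pvBuildInit_cons (by push_cast; omega)]
    refine ⟨by ring, ?_⟩
    have := ih (j + 1)
    have harg : j + (k' + 1 : Nat) = (j + 1) + (k' : Nat) := by push_cast; ring
    rw [harg]
    simpa using this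

theorem pvRow_rel (c : Char) : ∀ (s2 : List Char) (pa pb : List Int) (i j la lb : Int),
    pa.length = s2.length + 1 → pvRel i j pa pb → la = (i + 1) + j - 2 * lb →
    pvRel (i + 1) (j + 1) (pvRowA c s2 pa la) (pvRowB c s2 pb lb) ∧
      (pvRowA c s2 pa la).length = s2.length := by
  intro s2
  induction s2 with
  | nil =>
    intro pa pb i j la lb _ _ _
    constructor
    · cases pa with
      | nil => simp [pvRowA, pvRowB, pvRel]
      | cons a as =>
        cases as with
        | nil => simp [pvRowA, pvRowB, pvRel]
        | cons a' as' => simp [pvRowA, pvRowB, pvRel]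
    · cases pa with
      | nil => simp [pvRowA]
      | cons a as =>
        cases as with
        | nil => simp [pvRowA]
        | cons a' as' => simp [pvRowA]
  | cons d s2' ih =>
    intro pa pb i j la lb hlen hrel hla
    match pa, pb, hrel with
    | diag :: rest, diagB :: restB, hrel =>
      match rest, restB, hrel.2 with
      | up :: rest', upB :: restB', hrel2 =>
        have hdiag : diag = i + j - 2 * diagB := hrel.1
        have hup : up = i + (j + 1) - 2 * upB := hrel2.1
        simp only [pvRowA, pvRowB]
        by_cases hc : (c == d) = true
        · simp only [hc, if_pos]
          have hv : diag = (i + 1) + (j + 1) - 2 * (diagB + 1) := by omega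
          refine ⟨⟨hv, ?_⟩, ?_⟩
          · exact (ih (up :: rest') (upB :: restB') i (j + 1) diag (diagB + 1)
              (by simpa using hlen) hrel2 hv).1
          · have := (ih (up :: rest') (upB :: restB') i (j + 1) diag (diagB + 1)
              (by simpa using hlen) hrel2 hv).2
            simpa using this
        · simp only [hc, if_neg, Bool.false_eq_true, not_false_iff]
          set v : Int := if up + 1 < la + 1 then up + 1 else la + 1 with hvdef
          set vB : Int := max lb upB with hvBdef
          have hv : v = (i + 1) + (j + 1) - 2 * vB := by
            rw [hvdef, hvBdef]
            rcases max_cases lb upB with ⟨h1, h2⟩ | ⟨h1, h2⟩ <;> split_ifs <;> omega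
          refine ⟨⟨hv, ?_⟩, ?_⟩
          · exact (ih (up :: rest') (upB :: restB') i (j + 1) v vB
              (by simpa using hlen) hrel2 hv).1
          · have := (ih (up :: rest') (upB :: restB') i (j + 1) v vB
              (by simpa using hlen) hrel2 hv).2
            simpa using this

theorem pvLoop_rel (s2 : List Char) : ∀ (s1 : List Char) (i : Int) (pa pb : List Int),
    pa.length = s2.length + 1 → pvRel i 0 pa pb →
    pvRel (i + s1.length) 0 (pvLoopA s2 s1 i pa) (pvLoopB s2 s1 pb) ∧
      (pvLoopA s2 s1 i pa).length = s2.length + 1 := by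
  intro s1
  induction s1 with
  | nil =>
    intro i pa pb hlen hrel
    simpa [pvLoopA, pvLoopB] using ⟨hrel, hlen⟩
  | cons c s1' ih =>
    intro i pa pb hlen hrel
    simp only [pvLoopA, pvLoopB]
    have hrow := pvRow_rel c s2 pa pb i 0 (i + 1) 0 hlen hrel (by ring)
    have hrel' : pvRel (i + 1) 0 ((i + 1) :: pvRowA c s2 pa (i + 1))
        (0 :: pvRowB c s2 pb 0) := ⟨by ring, by simpa using hrow.1⟩
    have hlen' : ((i + 1) :: pvRowA c s2 pa (i + 1)).length = s2.length + 1 := by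
      simp [hrow.2]
    have := ih (i + 1) _ _ hlen' hrel'
    constructor
    · have harg : i + 1 + (s1'.length : Int) = i + ((s1'.length : Nat) + 1 : Nat) := by
        push_cast; ring
      rw [harg] at this
      simpa using this.1
    · exact this.2

-- ===== VERDICT (by name: the statement is the Claim_ definition above) =====
theorem insertion_deletion_distance_spec : Claim_equal_insertion_deletion_distance := by
  intro s1 s2 _
  unfold Spec_insertion_deletion_distance insertion_deletion_distance insertion_deletion_distance_alt
  set L1 := s1.toList
  set L2 := s2.toList
  set n : Nat := L2.length with hn
  have hinit := pvRel_init n 0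
  simp only [zero_add] at hinit
  have hinitlen : (pvBuildInit 0 (n : Int)).length = n + 1 := by
    have := pvRel_length hinit
    simpa using this
  have hloop := pvLoop_rel L2 L1 0 (pvBuildInit 0 (n : Int)) (List.replicate (n + 1) 0)
    hinitlen hinit
  have hrel := hloop.1
  have hlenA := hloop.2
  have hlenB : (pvLoopB L2 L1 (List.replicate (n + 1) 0)).length = n + 1 := by
    rw [← pvRel_length hrel]; exact hlenA
  have hget := pvRel_getD _ _ 0 n hrel (by omega)
  simp only [PySem.List.pyGetD_natCast]
  simp only [zero_add] at hget
  rw [hget]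
  ring
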